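-- pv_equiv track=rewrite | github.com/DanieleSavino/Progettazione_di_Algoritmi | src/lezione_1/unione_sottoinsiemi.py | unione_sottoinsiemi_set
-- ===== SOURCE A (Python) =====
-- def unione_sottoinsiemi_set(sets: list[set], S: set):
--     """
--         L'algoritmo con set utilizza un hashset per memorizzare gli insiemi già visti, e per ogni set
--         controlla se abbiamo gia visto il suo complemento rispetto a `S`.
--     """
--     # Tempo: `O(n)`, in media dove `n` è il numero di sottoinsiemi. poichè le operazioni di inserimento e ricerca in un hashset hanno complessità media `O(1)`, anche se la ricerca è `O(n)` nel caso pessimo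
--     # Spazio: `O(n)`, poiché deve memorizzare tutti gli insiemi nel caso peggiore.
--
--     seen = set()
--
--     for A in sets:
--         complement = frozenset(S-A)
--         if complement in seen:
--             return True
--         seen.add(frozenset(A))
--
--     return False
-- ===== SOURCE B (Python) =====
-- def unione_sottoinsiemi_set(sets: list[set], S: set):
--     # Pairwise scan, no auxiliary structure: the earlier set must equal S minus the later set.
--     for j in range(len(sets)):
--         target = set(S) - set(sets[j])
--         for i in range(j):
--             if set(sets[i]) == target:
--                 return True
--     return False
-- ===== Notes on version B (the rewrite author's own statement) =====
-- stated objective: simpler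
-- what changed: Replaces the seen-hashset accumulator with a direct double index scan: for each later set j it compares S - sets[j] against every earlier set i < j, returning True on the first match; no auxiliary structure is maintained.
import Mathlib
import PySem

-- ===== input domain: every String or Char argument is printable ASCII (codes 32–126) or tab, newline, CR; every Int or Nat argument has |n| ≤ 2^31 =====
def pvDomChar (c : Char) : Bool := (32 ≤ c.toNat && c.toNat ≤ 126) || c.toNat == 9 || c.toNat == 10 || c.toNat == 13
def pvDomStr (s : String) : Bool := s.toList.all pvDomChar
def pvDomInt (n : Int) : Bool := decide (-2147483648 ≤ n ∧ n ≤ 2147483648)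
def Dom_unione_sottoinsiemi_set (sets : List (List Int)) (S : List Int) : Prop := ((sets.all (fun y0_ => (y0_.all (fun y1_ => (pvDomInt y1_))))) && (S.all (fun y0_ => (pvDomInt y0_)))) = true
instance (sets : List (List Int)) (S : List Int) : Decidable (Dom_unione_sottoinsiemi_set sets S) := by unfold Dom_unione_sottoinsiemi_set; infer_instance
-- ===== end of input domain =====

-- B replaces A's seen-hashset accumulator by a direct pairwise index scan (no auxiliary
-- structure); same return value, no speed claim.

-- Python set/frozenset equality: two collections are equal iff they have the same members.
def pySetEq (a b : List Int) : Bool := a.all (fun x => b.contains x) && b.all (fun x => a.contains x)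

-- Python set difference S - A: the members of S not in A (duplicates are irrelevant to
-- pySetEq, so no dedup step is needed; exact for every comparison made here).
def pyDiff (S A : List Int) : List Int := S.filter (fun x => !(A.contains x))

-- ===== PORT A =====
-- A's `seen` is a Python set of frozensets used only through membership tests; we carry it
-- as a list and append each frozenset(A) (`seen.add`), testing membership with frozenset
-- equality `pySetEq` — observationally exact, since only membership is ever consulted.
def pvLoopA (S : List Int) (seen : List (List Int)) : List (List Int) → Bool
  | [] => false
  | A :: rest =>
      let complement := pyDiff S A
      if seen.any (fun s => pySetEq s complement) then true
      else pvLoopA S (seen ++ [A]) rest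

def unione_sottoinsiemi_set (sets : List (List Int)) (S : List Int) : Bool :=
  pvLoopA S [] sets

-- ===== PORT B =====
def unione_sottoinsiemi_set_alt (sets : List (List Int)) (S : List Int) : Bool :=
  (PySem.List.pyRange 0 sets.length 1).any (fun j =>
    let target := pyDiff S (PySem.List.pyGetD sets j [])
    (PySem.List.pyRange 0 j 1).any (fun i => pySetEq (PySem.List.pyGetD sets i []) target))

-- ===== PRECONDITION & SPEC =====
def Spec_unione_sottoinsiemi_set (sets : List (List Int)) (S : List Int) (out : Bool) : Prop := out = unione_sottoinsiemi_set_alt sets S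
instance (sets : List (List Int)) (S : List Int) (out : Bool) : Decidable (Spec_unione_sottoinsiemi_set sets S out) := by unfold Spec_unione_sottoinsiemi_set; infer_instance

-- ===== CLAIM (what is proved, stated in full; the proofs are below) =====
def Claim_equal_unione_sottoinsiemi_set : Prop := ∀ (sets : List (List Int)) (S : List Int), Dom_unione_sottoinsiemi_set sets S → Spec_unione_sottoinsiemi_set sets S (unione_sottoinsiemi_set sets S)

-- ===== LEMMAS AND PROOFS =====

-- The common characterisation both ports are reduced to.
def pvSpecAny (S : List Int) (sets : List (List Int)) : Bool :=
  (List.range sets.length).any (fun j =>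
    (List.range j).any (fun i => pySetEq (sets.getD i []) (pyDiff S (sets.getD j []))))

lemma take_any_eq_range_any (f : List Int → Bool) :
    ∀ (xs : List (List Int)) (j : Nat), j ≤ xs.length →
      (xs.take j).any f = (List.range j).any (fun i => f (xs.getD i [])) := by
  intro xs
  induction xs with
  | nil =>
      intro j hj
      simp [Nat.le_zero.mp hj]
  | cons x xs ih =>
      intro j hj
      cases j with
      | zero => simp
      | succ k =>
          simp [List.range_succ_eq_map, List.any_map, Function.comp_def, List.getD,
            ih k (by simpa using hj)]

lemma loopA_eq (S : List Int) :
    ∀ (rest pre : List (List Int)),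
      pvLoopA S pre rest =
        (List.range rest.length).any (fun j =>
          (pre ++ rest.take j).any (fun s => pySetEq s (pyDiff S (rest.getD j [])))) := by
  intro rest
  induction rest with
  | nil => intro pre; simp [pvLoopA]
  | cons A rest ih =>
      intro pre
      simp only [pvLoopA, List.length_cons, List.range_succ_eq_map, List.any_cons]
      by_cases h : (pre.any fun s => pySetEq s (pyDiff S A)) = true
      · simp [h, List.getD]
      · simp only [h, Bool.false_eq_true, if_false]
        rw [ih (pre ++ [A])]
        simp only [Bool.not_eq_true] at h
        simp [List.any_map, Function.comp_def, List.any_append, List.any_cons,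
          List.getD, h]

lemma pv_any_congr_mem {α : Type} (l : List α) (f g : α → Bool)
    (h : ∀ a ∈ l, f a = g a) : l.any f = l.any g := by
  induction l with
  | nil => rfl
  | cons x xs ih =>
      simp only [List.any_cons, h x (by simp), ih (fun a ha => h a (by simp [ha]))]

lemma portA_eq_spec (sets : List (List Int)) (S : List Int) :
    unione_sottoinsiemi_set sets S = pvSpecAny S sets := by
  unfold unione_sottoinsiemi_set pvSpecAny
  rw [loopA_eq]
  refine pv_any_congr_mem _ _ _ ?_
  intro j hj
  rw [List.nil_append, take_any_eq_range_any _ sets j (le_of_lt (by simpa using hj))]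

lemma portB_eq_spec (sets : List (List Int)) (S : List Int) :
    unione_sottoinsiemi_set_alt sets S = pvSpecAny S sets := by
  unfold unione_sottoinsiemi_set_alt pvSpecAny
  simp [PySem.List.pyRange_one, List.any_map, Function.comp_def]

-- ===== VERDICT (by name: the statement is the Claim_ definition above) =====
theorem unione_sottoinsiemi_set_spec : Claim_equal_unione_sottoinsiemi_set := by
  intro sets S _
  unfold Spec_unione_sottoinsiemi_set
  rw [portA_eq_spec, portB_eq_spec]
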